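-- pv_equiv track=rewrite | github.com/galaxyproject/galaxy-visualizations | packages/vintent/vintent/vintent/modules/utility.py | user_asked_for
-- ===== SOURCE A (Python) =====
-- def user_asked_for(context, keywords):
--     if not context:
--         return False
--     last = None
--     for t in reversed(context):
--         if t.get("role") == "user" and isinstance(t.get("content"), str):
--             last = t.get("content").lower()
--             break
--     if not last:
--         return False
--     words = last.split()
--     for w in words:
--         for k in keywords:
--             if len(k) <= 5:
--                 if w == k:
--                     return True
--             else:
--                 if _edit_distance_leq_one(w, k):
--                     return True
--     return False
--
-- def _edit_distance_leq_one(a, b):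
--     la = len(a)
--     lb = len(b)
--     if abs(la - lb) > 1:
--         return False
--     if a == b:
--         return True
--     if la == lb:
--         diff = 0
--         for i in range(la):
--             if a[i] != b[i]:
--                 diff += 1
--                 if diff > 1:
--                     return False
--         return True
--     if la + 1 == lb:
--         return _one_insert_away(a, b)
--     if lb + 1 == la:
--         return _one_insert_away(b, a)
--     return False
--
-- def _one_insert_away(shorter, longer):
--     i = 0
--     j = 0
--     diff = 0
--     while i < len(shorter) and j < len(longer):
--         if shorter[i] == longer[j]:
--             i += 1
--             j += 1
--         else:
--             diff += 1
--             if diff > 1: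
--                 return False
--             j += 1
--     return True
-- ===== SOURCE B (Python) =====
-- def _ed1(a, b):
--     # edit distance <= 1 via common-prefix skip, then one three-way suffix check
--     i = 0
--     while i < len(a) and i < len(b) and a[i] == b[i]:
--         i += 1
--     ta, tb = a[i:], b[i:]
--     if not ta or not tb:
--         return abs(len(ta) - len(tb)) <= 1
--     return ta[1:] == tb[1:] or ta == tb[1:] or ta[1:] == tb
--
--
-- def user_asked_for(context, keywords):
--     last = None
--     for t in context:
--         c = t.get("content")
--         if t.get("role") == "user" and isinstance(c, str):
--             last = c
--     if not last:
--         return False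
--     words = last.lower().split()
--     exact = {k for k in keywords if len(k) <= 5}
--     fuzzy = [k for k in keywords if len(k) > 5]
--     return any(w in exact or any(_ed1(w, k) for k in fuzzy) for w in words)
-- ===== Notes on version B (the rewrite author's own statement) =====
-- stated objective: alternative
-- what changed: B finds the last user message with a single forward scan instead of reversing, partitions keywords once into an exact-match set (len<=5) and a fuzzy list, and replaces A's three length-cased edit-distance scans (_edit_distance_leq_one/_one_insert_away) by one common-prefix skip followed by a three-way suffix equality check.
import Mathlib
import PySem

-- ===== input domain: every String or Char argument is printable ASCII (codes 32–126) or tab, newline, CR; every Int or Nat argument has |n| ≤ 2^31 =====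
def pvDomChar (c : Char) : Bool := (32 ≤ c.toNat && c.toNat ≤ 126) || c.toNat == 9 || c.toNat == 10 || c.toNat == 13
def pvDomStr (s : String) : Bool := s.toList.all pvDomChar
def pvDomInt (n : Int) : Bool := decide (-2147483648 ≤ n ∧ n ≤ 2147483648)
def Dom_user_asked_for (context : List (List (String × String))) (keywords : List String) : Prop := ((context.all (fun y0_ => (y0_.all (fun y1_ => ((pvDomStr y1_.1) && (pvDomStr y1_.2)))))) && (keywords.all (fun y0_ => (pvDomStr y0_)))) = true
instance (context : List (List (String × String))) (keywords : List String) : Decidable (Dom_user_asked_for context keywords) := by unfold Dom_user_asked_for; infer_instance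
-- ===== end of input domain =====

-- B replaces A's three length-cased edit-distance scans by one prefix-skip recursion with a
-- three-way suffix check, partitions the keywords once into an exact-match set (len ≤ 5) and a
-- fuzzy list, and finds the last user message by a single forward scan instead of reversing.
-- Objective: alternative (same asymptotic cost, different algorithm). Return value only; no mutation.

-- ===== PORT A =====

-- for-loop of `_edit_distance_leq_one` (equal lengths): walk both strings counting mismatches, bail at 2
def pvDiffLoop : List Char → List Char → Nat → Bool
  | x :: a, y :: b, diff =>
      if x ≠ y then
        (if diff + 1 > 1 then false else pvDiffLoop a b (diff + 1))
      else pvDiffLoop a b diff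
  | _, _, _ => true

-- `_one_insert_away`: while i < len(shorter) and j < len(longer)
def pvOneIns (s l : List Char) (diff : Nat) : Bool :=
  match s, l with
  | x :: s', y :: l' =>
      if x = y then pvOneIns s' l' diff
      else (if diff + 1 > 1 then false else pvOneIns (x :: s') l' (diff + 1))
  | _, _ => true
termination_by l.length

-- `_edit_distance_leq_one`
def pvEdLeqOne (a b : String) : Bool :=
  let la := a.toList.length
  let lb := b.toList.length
  if ((la : Int) - (lb : Int)).natAbs > 1 then false
  else if a == b then true
  else if la = lb then pvDiffLoop a.toList b.toList 0
  else if la + 1 = lb then pvOneIns a.toList b.toList 0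
  else if lb + 1 = la then pvOneIns b.toList a.toList 0
  else false

-- `for t in reversed(context): … break` (call with context.reverse)
def pvFindLast : List (List (String × String)) → Option String
  | [] => none
  | t :: rest =>
      if ((PySem.Dict.mk t).get? "role" == some "user") && ((PySem.Dict.mk t).get? "content").isSome
      then ((PySem.Dict.mk t).get? "content").map PySem.Str.lower
      else pvFindLast rest

def user_asked_for (context : List (List (String × String))) (keywords : List String) : Bool :=
  if context = [] then false
  else
    match pvFindLast context.reverse with
    | none => false
    | some last =>
      if last = "" then false
      else
        (PySem.Str.split₀ last).any (fun w =>
          keywords.any (fun k =>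
            if k.toList.length ≤ 5 then w == k else pvEdLeqOne w k))

-- ===== PORT B =====

-- `_ed1`: skip the common prefix, then one three-way suffix check
def pvEd1 : List Char → List Char → Bool
  | [], b => b.length ≤ 1
  | a, [] => a.length ≤ 1
  | x :: a, y :: b =>
      if x = y then pvEd1 a b
      else (a == b) || ((x :: a) == b) || (a == (y :: b))

def user_asked_for_alt (context : List (List (String × String))) (keywords : List String) : Bool :=
  let last := context.foldl (fun acc t =>
    let c := (PySem.Dict.mk t).get? "content"
    if ((PySem.Dict.mk t).get? "role" == some "user") && c.isSome then c else acc) none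
  match last with
  | none => false
  | some s =>
    if s = "" then false
    else
      let words := PySem.Str.split₀ (PySem.Str.lower s)
      let exact : PySem.Set String := PySem.Set.ofList (keywords.filter (fun k => decide (k.toList.length ≤ 5)))
      let fuzzy := keywords.filter (fun k => decide (5 < k.toList.length))
      words.any (fun w => exact.contains w || fuzzy.any (fun k => pvEd1 w.toList k.toList))

-- ===== PRECONDITION & SPEC =====
def Spec_user_asked_for (context : List (List (String × String))) (keywords : List String) (out : Bool) : Prop := out = user_asked_for_alt context keywords
instance (context : List (List (String × String))) (keywords : List String) (out : Bool) : Decidable (Spec_user_asked_for context keywords out) := by unfold Spec_user_asked_for; infer_instance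

-- ===== CLAIM (what is proved, stated in full; the proofs are below) =====
def Claim_equal_user_asked_for : Prop := ∀ (context : List (List (String × String))) (keywords : List String), Dom_user_asked_for context keywords → Spec_user_asked_for context keywords (user_asked_for context keywords)

-- ===== LEMMAS AND PROOFS =====

-- the last-user search, without the lowering (proof helper)
def pvRawFind : List (List (String × String)) → Option String
  | [] => none
  | t :: rest =>
      if ((PySem.Dict.mk t).get? "role" == some "user") && ((PySem.Dict.mk t).get? "content").isSome
      then (PySem.Dict.mk t).get? "content"
      else pvRawFind rest

theorem pvFindLast_eq_raw (l : List (List (String × String))) :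
    pvFindLast l = (pvRawFind l).map PySem.Str.lower := by
  induction l with
  | nil => rfl
  | cons t rest ih =>
      by_cases h : (((PySem.Dict.mk t).get? "role" == some "user") && ((PySem.Dict.mk t).get? "content").isSome) = true
      · simp [pvFindLast, pvRawFind, h]
      · simp [pvFindLast, pvRawFind, h] at *; exact ih

theorem pvRawFind_append_singleton (xs : List (List (String × String))) (t : List (String × String)) :
    pvRawFind (xs ++ [t]) =
      match pvRawFind xs with
      | some v => some v
      | none => pvRawFind [t] := by
  induction xs with
  | nil => rfl
  | cons u rest ih =>
      by_cases h : (((PySem.Dict.mk u).get? "role" == some "user") && ((PySem.Dict.mk u).get? "content").isSome) = true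
      · simp only [Bool.and_eq_true, beq_iff_eq] at h
        obtain ⟨v, hv⟩ := Option.isSome_iff_exists.mp h.2
        simp [pvRawFind, h.1, hv]
      · simpa [pvRawFind, h] using ih

theorem pvFoldl_eq_rawFind (l : List (List (String × String))) (init : Option String) :
    l.foldl (fun acc t =>
      let c := (PySem.Dict.mk t).get? "content"
      if ((PySem.Dict.mk t).get? "role" == some "user") && c.isSome then c else acc) init =
    (match pvRawFind l.reverse with
     | some v => some v
     | none => init) := by
  induction l generalizing init with
  | nil => rfl
  | cons t rest ih =>
      rw [List.foldl_cons, ih]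
      have hrev : (t :: rest).reverse = rest.reverse ++ [t] := by simp
      rw [hrev, pvRawFind_append_singleton]
      by_cases h : (((PySem.Dict.mk t).get? "role" == some "user") && ((PySem.Dict.mk t).get? "content").isSome) = true
      · have h' := h
        simp only [Bool.and_eq_true, beq_iff_eq] at h'
        obtain ⟨v, hv⟩ := Option.isSome_iff_exists.mp h'.2
        cases hr : pvRawFind rest.reverse <;>
          simp [pvRawFind, h, h'.1, hv]
      · cases hr : pvRawFind rest.reverse <;>
          simp [pvRawFind, h]

-- --- edit-distance core: pvEdLeqOne a b = pvEd1 a.toList b.toList ---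

theorem pvEd1_self (a : List Char) : pvEd1 a a = true := by
  induction a with
  | nil => rfl
  | cons x a ih => simp [pvEd1, ih]

theorem pvEd1_far (a b : List Char) (h : a.length + 2 ≤ b.length ∨ b.length + 2 ≤ a.length) :
    pvEd1 a b = false := by
  induction a generalizing b with
  | nil =>
      cases b with
      | nil => simp at h
      | cons y b =>
          simp at h
          simp only [pvEd1, List.length_cons, decide_eq_false_iff_not]
          omega
  | cons x a ih =>
      cases b with
      | nil =>
          simp at h
          simp only [pvEd1, List.length_cons, decide_eq_false_iff_not]
          omega
      | cons y b =>
          simp at h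
          by_cases hxy : x = y
          · simp [pvEd1, hxy]; exact (by simpa using ih b (by omega))
          · have h1 : (a == b) = false := by
              simp [beq_iff_eq]; intro hc; have := congrArg List.length hc; simp at this; omega
            have h2 : ((x :: a) == b) = false := by
              simp [beq_iff_eq]; intro hc; have := congrArg List.length hc; simp at this; omega
            have h3 : (a == (y :: b)) = false := by
              simp [beq_iff_eq]; intro hc; have := congrArg List.length hc; simp at this; omega
            simp [pvEd1, hxy, h1, h2, h3]

theorem pvDiffLoop_one (a b : List Char) (h : a.length = b.length) :
    pvDiffLoop a b 1 = (a == b) := by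
  induction a generalizing b with
  | nil => cases b with
      | nil => rfl
      | cons y b => simp at h
  | cons x a ih =>
      cases b with
      | nil => simp at h
      | cons y b =>
          simp at h
          by_cases hxy : x = y
          · simp [pvDiffLoop, hxy, ih b h]
          · have hcc : (((x :: a) : List Char) == (y :: b)) = false := by simp [hxy]
            simp [pvDiffLoop, hxy, hcc]

theorem pvDiffLoop_zero (a b : List Char) (h : a.length = b.length) :
    pvDiffLoop a b 0 = pvEd1 a b := by
  induction a generalizing b with
  | nil => cases b with
      | nil => rfl
      | cons y b => simp at h
  | cons x a ih =>
      cases b with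
      | nil => simp at h
      | cons y b =>
          simp at h
          by_cases hxy : x = y
          · simp [pvDiffLoop, pvEd1, hxy, ih b h]
          · have h2 : ((x :: a) == b) = false := by
              simp [beq_iff_eq]; intro hc; have := congrArg List.length hc; simp at this; omega
            have h3 : (a == (y :: b)) = false := by
              simp [beq_iff_eq]; intro hc; have := congrArg List.length hc; simp at this; omega
            simp [pvDiffLoop, pvEd1, hxy, h2, h3, pvDiffLoop_one a b h]

theorem pvOneIns_one (s l : List Char) (h : s.length = l.length) :
    pvOneIns s l 1 = (s == l) := by
  induction s generalizing l with
  | nil => cases l with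
      | nil => simp [pvOneIns]
      | cons y l => simp at h
  | cons x s ih =>
      cases l with
      | nil => simp at h
      | cons y l =>
          simp at h
          by_cases hxy : x = y
          · simp [pvOneIns, hxy, ih l h]
          · have hcc : (((x :: s) : List Char) == (y :: l)) = false := by simp [hxy]
            simp [pvOneIns, hxy, hcc]

theorem pvOneIns_zero_ins (a b : List Char) (h : a.length + 1 = b.length) :
    pvOneIns a b 0 = pvEd1 a b := by
  induction b generalizing a with
  | nil => simp at h
  | cons y b ih =>
      cases a with
      | nil =>
          simp at h
          simp [pvOneIns, pvEd1]; omega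
      | cons x a =>
          simp at h
          by_cases hxy : x = y
          · simp [pvOneIns, pvEd1, hxy, ih a h]
          · have h1 : (a == b) = false := by
              simp [beq_iff_eq]; intro hc; have := congrArg List.length hc; simp at this; omega
            have h3 : (a == (y :: b)) = false := by
              simp [beq_iff_eq]; intro hc; have := congrArg List.length hc; simp at this; omega
            simp [pvOneIns, pvEd1, hxy, h1, h3, pvOneIns_one (x :: a) b (by simp; omega)]

theorem pvOneIns_zero_del (a b : List Char) (h : b.length + 1 = a.length) :
    pvOneIns b a 0 = pvEd1 a b := by
  induction a generalizing b with
  | nil => simp at h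
  | cons x a ih =>
      cases b with
      | nil =>
          simp at h
          simp [pvOneIns, pvEd1]; omega
      | cons y b =>
          simp at h
          by_cases hxy : x = y
          · subst hxy
            simp [pvOneIns, pvEd1, ih b h]
          · have hyx : ¬ y = x := fun hc => hxy hc.symm
            have h1 : (a == b) = false := by
              simp [beq_iff_eq]; intro hc; have := congrArg List.length hc; simp at this; omega
            have h2 : ((x :: a) == b) = false := by
              simp [beq_iff_eq]; intro hc; have := congrArg List.length hc; simp at this; omega
            have hL : pvOneIns (y :: b) (x :: a) 0 = ((y :: b) == a) := by
              rw [show pvOneIns (y :: b) (x :: a) 0 = pvOneIns (y :: b) a 1 from by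
                simp [pvOneIns, hyx]]
              exact pvOneIns_one (y :: b) a (by simp; omega)
            have hR : pvEd1 (x :: a) (y :: b) = (a == (y :: b)) := by
              simp [pvEd1, hxy, h1, h2]
            rw [hL, hR]
            simp [eq_comm]

theorem pvEdLeqOne_eq_pvEd1 (a b : String) :
    pvEdLeqOne a b = pvEd1 a.toList b.toList := by
  unfold pvEdLeqOne
  set la := a.toList.length with hla
  set lb := b.toList.length with hlb
  by_cases hfar : ((la : Int) - (lb : Int)).natAbs > 1
  · simp [hfar]
    refine pvEd1_far _ _ ?_
    omega
  · simp [hfar]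
    by_cases heq : a = b
    · subst heq; simp [pvEd1_self]
    · have hne : (a == b) = false := by simp [heq]
      simp [heq]
      by_cases h1 : la = lb
      · simp [h1, pvDiffLoop_zero a.toList b.toList (by omega)]
      · simp [h1]
        by_cases h2 : la + 1 = lb
        · simp [h2, pvOneIns_zero_ins a.toList b.toList (by omega)]
        · simp [h2]
          by_cases h3 : lb + 1 = la
          · simp [h3, pvOneIns_zero_del a.toList b.toList (by omega)]
          · omega

-- per-word: A's keyword loop = B's exact-set lookup plus fuzzy scan
theorem pvKw_eq (w : String) (ks : List String) :
    (ks.any (fun k => if k.toList.length ≤ 5 then w == k else pvEdLeqOne w k)) =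
    ((PySem.Set.ofList (ks.filter (fun k => decide (k.toList.length ≤ 5)))).contains w ||
      (ks.filter (fun k => decide (5 < k.toList.length))).any (fun k => pvEd1 w.toList k.toList)) := by
  rw [Bool.eq_iff_iff]
  simp only [List.any_eq_true, PySem.Set.contains, List.contains_iff_mem, PySem.Set.mem_ofList,
    List.mem_filter, decide_eq_true_eq, Bool.or_eq_true]
  constructor
  · rintro ⟨k, hk, hcond⟩
    by_cases h5 : k.toList.length ≤ 5
    · rw [if_pos h5, beq_iff_eq] at hcond; subst hcond; exact Or.inl ⟨hk, h5⟩
    · rw [if_neg h5, pvEdLeqOne_eq_pvEd1] at hcond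
      exact Or.inr ⟨k, ⟨hk, by omega⟩, hcond⟩
  · rintro (⟨hk, h5⟩ | ⟨k, ⟨hk, h5⟩, hed⟩)
    · exact ⟨w, hk, by rw [if_pos h5]; exact beq_self_eq_true w⟩
    · exact ⟨k, hk, by
        rw [if_neg (show ¬ k.toList.length ≤ 5 by omega), pvEdLeqOne_eq_pvEd1]; exact hed⟩

theorem pvLower_eq_empty (s : String) : (PySem.Str.lower s = "") ↔ (s = "") := by
  rw [← String.toList_inj, ← String.toList_inj]
  simp [PySem.Chars.lower]

-- ===== VERDICT (by name: the statement is the Claim_ definition above) =====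
theorem user_asked_for_spec : Claim_equal_user_asked_for := by
  intro context keywords _
  unfold Spec_user_asked_for user_asked_for user_asked_for_alt
  rw [pvFoldl_eq_rawFind, pvFindLast_eq_raw]
  cases hr : pvRawFind context.reverse with
  | none =>
      cases context <;> simp
  | some v =>
      have hctx : context ≠ [] := by
        intro hc; subst hc; simp [pvRawFind] at hr
      simp only [if_neg hctx, Option.map_some]
      by_cases hv : v = ""
      · simp [hv, pvLower_eq_empty]
      · have hlv : ¬ (PySem.Str.lower v = "") := fun hc => hv ((pvLower_eq_empty v).mp hc)
        simp only [if_neg hv, if_neg hlv]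
        exact congrArg (List.any _) (funext fun w => pvKw_eq w keywords)
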